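-- pv_equiv track=rewrite | github.com/Monargoras/aoc2023 | aocDay5/aocDay5.py | calcSingleRangeMinimum
-- ===== SOURCE A (Python) =====
-- def calcSingleRangeMinimum(r, mapDict):
--     minimum = 9999999999999
--     for seed in r:
--         curVal = seed
--         for key, value in mapDict.items():
--             for dst, src, length in value:
--                 if src <= curVal < src + length:
--                     curVal = curVal + (dst - src)
--                     break
--         if curVal < minimum:
--             minimum = curVal
--     return minimum
-- ===== SOURCE B (Python) =====
-- def calcSingleRangeMinimum(r, mapDict):
--     # interval-splitting: push half-open intervals [lo, hi) through each map
--     # layer, splitting them at rule boundaries, instead of mapping each seed;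
--     # overlapping intervals are coalesced after every layer
--     ivs = []
--     for v in sorted(set(r)):
--         if ivs and ivs[-1][1] == v:
--             ivs[-1] = (ivs[-1][0], v + 1)
--         else:
--             ivs.append((v, v + 1))
--     for rules in mapDict.values():
--         out = []
--         for iv in ivs:
--             pend = [iv]
--             for dst, src, length in rules:
--                 nxt = []
--                 for a, b in pend:
--                     s = max(a, src)
--                     e = min(b, src + length)
--                     if s < e:
--                         out.append((s + dst - src, e + dst - src))
--                         if a < s:
--                             nxt.append((a, s))
--                         if e < b:
--                             nxt.append((e, b))
--                     else:
--                         nxt.append((a, b))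
--                 pend = nxt
--             out.extend(pend)
--         out.sort(key=lambda iv: iv[0])
--         ivs = []
--         for lo, hi in out:
--             if ivs and lo <= ivs[-1][1]:
--                 ivs[-1] = (ivs[-1][0], max(ivs[-1][1], hi))
--             else:
--                 ivs.append((lo, hi))
--     return min([9999999999999] + [lo for lo, _ in ivs])
-- ===== Notes on version B (the rewrite author's own statement) =====
-- stated objective: alternative
-- what changed: Interval splitting: B compresses the distinct seeds into half-open intervals and pushes whole intervals through each map layer, splitting them at rule boundaries and coalescing overlapping intervals after each layer, then takes the min of the final interval lower bounds; A maps every seed individually through every layer.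
import Mathlib
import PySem

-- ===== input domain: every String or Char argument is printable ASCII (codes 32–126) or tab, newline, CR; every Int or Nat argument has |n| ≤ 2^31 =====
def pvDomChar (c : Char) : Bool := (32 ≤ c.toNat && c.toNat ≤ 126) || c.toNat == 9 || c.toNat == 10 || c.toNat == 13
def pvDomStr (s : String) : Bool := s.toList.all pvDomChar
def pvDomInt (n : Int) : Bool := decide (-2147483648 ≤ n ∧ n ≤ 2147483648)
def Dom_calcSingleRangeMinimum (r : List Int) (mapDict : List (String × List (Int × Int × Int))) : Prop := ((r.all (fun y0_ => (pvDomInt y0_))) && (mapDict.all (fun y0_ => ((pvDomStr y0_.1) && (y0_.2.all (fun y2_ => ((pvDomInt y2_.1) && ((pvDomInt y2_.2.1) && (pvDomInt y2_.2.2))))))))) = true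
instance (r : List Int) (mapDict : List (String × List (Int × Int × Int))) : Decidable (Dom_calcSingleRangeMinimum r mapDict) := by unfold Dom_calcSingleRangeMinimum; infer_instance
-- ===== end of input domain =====

-- B replaces A's per-seed mapping by interval splitting: the distinct seeds are
-- compressed into half-open intervals pushed whole through each map layer
-- (split at rule boundaries, coalesced after every layer); objective: alternative algorithm.

-- ===== PORT A =====
-- inner 'for dst, src, length in value: if …: curVal += dst - src; break'
def pvA_applyRules (curVal : Int) : List (Int × Int × Int) → Int
  | [] => curVal
  | (dst, src, length) :: rest =>
    if src ≤ curVal ∧ curVal < src + length then curVal + (dst - src)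
    else pvA_applyRules curVal rest

def calcSingleRangeMinimum (r : List Int) (mapDict : List (String × List (Int × Int × Int))) : Int :=
  r.foldl (fun minimum seed =>
    let curVal := mapDict.foldl (fun curVal kv => pvA_applyRules curVal kv.2) seed
    if curVal < minimum then curVal else minimum) 9999999999999

-- ===== PORT B =====
-- Source B's run builder: 'for v in sorted(set(r)): if ivs and ivs[-1][1]==v: extend last else append'.
-- The growing list is kept reversed (update/append at the head) and reversed once at the end.
def pvRunStep (acc : List (Int × Int)) (v : Int) : List (Int × Int) :=
  match acc with
  | (a, b) :: t => if b = v then (a, v + 1) :: t else (v, v + 1) :: (a, b) :: t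
  | [] => [(v, v + 1)]

-- body of 'for a, b in pend' (s = max(a, src), e = min(b, src+length)); state = (out, nxt)
def pvRuleStep (dst src length : Int) (st : List (Int × Int) × List (Int × Int)) (ab : Int × Int) :
    List (Int × Int) × List (Int × Int) :=
  let s := max ab.1 src
  let e := min ab.2 (src + length)
  if s < e then
    (st.1 ++ [(s + dst - src, e + dst - src)],
     st.2 ++ (if ab.1 < s then [(ab.1, s)] else []) ++ (if e < ab.2 then [(e, ab.2)] else []))
  else (st.1, st.2 ++ [ab])

-- 'for dst, src, length in rules: nxt = []; for a, b in pend: …; pend = nxt'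
def pvPieceFold (rules : List (Int × Int × Int)) (out pend : List (Int × Int)) :
    List (Int × Int) × List (Int × Int) :=
  rules.foldl (fun st q => st.2.foldl (pvRuleStep q.1 q.2.1 q.2.2) (st.1, [])) (out, pend)

-- 'for iv in ivs: pend = [iv]; <rules loop>; out.extend(pend)'
def pvLayer (rules : List (Int × Int × Int)) (ivs : List (Int × Int)) : List (Int × Int) :=
  ivs.foldl (fun out iv => (pvPieceFold rules out [iv]).1 ++ (pvPieceFold rules out [iv]).2) []

-- 'out.sort(key=…); for lo, hi in out: merge into ivs' — the growing list is
-- kept reversed (update/append at the head) and reversed once at the end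
def pvMergeStep (acc : List (Int × Int)) (iv : Int × Int) : List (Int × Int) :=
  match acc with
  | (a, b) :: t => if iv.1 ≤ b then (a, max b iv.2) :: t else (iv.1, iv.2) :: (a, b) :: t
  | [] => [(iv.1, iv.2)]

def pvNormalize (out : List (Int × Int)) : List (Int × Int) :=
  ((PySem.List.sorted out (fun iv => iv.1) false).foldl pvMergeStep []).reverse

def calcSingleRangeMinimum_alt (r : List Int) (mapDict : List (String × List (Int × Int × Int))) : Int :=
  let ivs0 := ((PySem.List.sorted (PySem.Set.ofList r) (fun x => x) false).foldl pvRunStep []).reverse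
  let ivs := mapDict.foldl (fun ivs kv => pvNormalize (pvLayer kv.2 ivs)) ivs0
  (PySem.List.min? ((9999999999999 : Int) :: ivs.map Prod.fst) (fun y => y)).getD 0

-- ===== PRECONDITION & SPEC =====
def Spec_calcSingleRangeMinimum (r : List Int) (mapDict : List (String × List (Int × Int × Int))) (out : Int) : Prop := out = calcSingleRangeMinimum_alt r mapDict
instance (r : List Int) (mapDict : List (String × List (Int × Int × Int))) (out : Int) : Decidable (Spec_calcSingleRangeMinimum r mapDict out) := by unfold Spec_calcSingleRangeMinimum; infer_instance

-- ===== CLAIM (what is proved, stated in full; the proofs are below) =====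
def Claim_equal_calcSingleRangeMinimum : Prop := ∀ (r : List Int) (mapDict : List (String × List (Int × Int × Int))), Dom_calcSingleRangeMinimum r mapDict → Spec_calcSingleRangeMinimum r mapDict (calcSingleRangeMinimum r mapDict)

-- ===== LEMMAS AND PROOFS =====

-- x is covered by the interval list (half-open intervals)
def pvCov (ivs : List (Int × Int)) (x : Int) : Prop := ∃ p ∈ ivs, p.1 ≤ x ∧ x < p.2
-- all intervals nonempty
def pvNE (ivs : List (Int × Int)) : Prop := ∀ p ∈ ivs, p.1 < p.2
-- some rule's source range contains x
def pvHits (x : Int) (rules : List (Int × Int × Int)) : Prop :=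
  ∃ q ∈ rules, q.2.1 ≤ x ∧ x < q.2.1 + q.2.2

theorem pvCov_nil (x : Int) : pvCov [] x ↔ False := by simp [pvCov]

theorem pvCov_cons (p : Int × Int) (t : List (Int × Int)) (x : Int) :
    pvCov (p :: t) x ↔ (p.1 ≤ x ∧ x < p.2) ∨ pvCov t x := by
  simp [pvCov]

theorem pvCov_append (xs ys : List (Int × Int)) (x : Int) :
    pvCov (xs ++ ys) x ↔ pvCov xs x ∨ pvCov ys x := by
  simp [pvCov, or_and_right, exists_or]

theorem pvCov_reverse (xs : List (Int × Int)) (x : Int) :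
    pvCov xs.reverse x ↔ pvCov xs x := by simp [pvCov]

theorem pvNE_append (xs ys : List (Int × Int)) :
    pvNE (xs ++ ys) ↔ pvNE xs ∧ pvNE ys := by
  simp [pvNE, or_imp, forall_and]

theorem pvHits_cons (x d s l : Int) (t : List (Int × Int × Int)) :
    pvHits x ((d, s, l) :: t) ↔ (s ≤ x ∧ x < s + l) ∨ pvHits x t := by
  simp [pvHits]

-- run building: coverage of the accumulator grows by exactly the seen values
theorem runStep_foldl_spec (vs : List Int) :
    ∀ acc : List (Int × Int), pvNE acc →
      pvNE (vs.foldl pvRunStep acc) ∧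
      (∀ x, pvCov (vs.foldl pvRunStep acc) x ↔ pvCov acc x ∨ x ∈ vs) := by
  induction vs with
  | nil => intro acc h; simpa using h
  | cons v t ih =>
    intro acc hacc
    simp only [List.foldl_cons]
    have hstep : pvNE (pvRunStep acc v) ∧
        (∀ x, pvCov (pvRunStep acc v) x ↔ pvCov acc x ∨ x = v) := by
      cases acc with
      | nil =>
        constructor
        · intro p hp
          have : p = (v, v + 1) := by simpa [pvRunStep] using hp
          subst this; simp
        · intro x; simp [pvRunStep, pvCov_cons, pvCov_nil]; omega
      | cons p t' =>
        obtain ⟨a, b⟩ := p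
        have hab : a < b := hacc (a, b) (by simp)
        have hrun : pvRunStep ((a, b) :: t') v
            = if b = v then (a, v + 1) :: t' else (v, v + 1) :: (a, b) :: t' := rfl
        by_cases hbv : b = v
        · rw [hrun, if_pos hbv]
          constructor
          · intro q hq
            rcases List.mem_cons.1 hq with rfl | hq'
            · simp; omega
            · exact hacc q (List.mem_cons_of_mem _ hq')
          · intro x
            rw [pvCov_cons, pvCov_cons]
            constructor
            · rintro (h | h)
              · simp only at h
                by_cases hx : x = v
                · exact Or.inr hx
                · exact Or.inl (Or.inl ⟨by omega, by omega⟩)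
              · exact Or.inl (Or.inr h)
            · rintro ((h | h) | h)
              · simp only at h ⊢; omega
              · exact Or.inr h
              · simp only; omega
        · rw [hrun, if_neg hbv]
          constructor
          · intro q hq
            rcases List.mem_cons.1 hq with rfl | hq'
            · simp
            · exact hacc q hq'
          · intro x
            rw [pvCov_cons, pvCov_cons]
            constructor
            · rintro (h | h)
              · exact Or.inr (by simp only at h; omega)
              · exact Or.inl h
            · rintro (h | h)
              · exact Or.inr h
              · exact Or.inl (by simp only; omega)
    obtain ⟨hne1, hcov1⟩ := hstep
    obtain ⟨hne2, hcov2⟩ := ih (pvRunStep acc v) hne1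
    refine ⟨hne2, fun x => ?_⟩
    rw [hcov2, hcov1]
    simp [List.mem_cons]
    tauto

-- one rule applied to one nonempty piece
theorem ruleStep_spec (dst src length a b : Int) (st : List (Int × Int) × List (Int × Int))
    (hab : a < b) (h1 : pvNE st.1) (h2 : pvNE st.2) :
    pvNE (pvRuleStep dst src length st (a, b)).1 ∧
    pvNE (pvRuleStep dst src length st (a, b)).2 ∧
    (∀ x, pvCov (pvRuleStep dst src length st (a, b)).1 x ↔
        pvCov st.1 x ∨ ∃ y, (a ≤ y ∧ y < b) ∧ (src ≤ y ∧ y < src + length) ∧ x = y + (dst - src)) ∧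
    (∀ x, pvCov (pvRuleStep dst src length st (a, b)).2 x ↔
        pvCov st.2 x ∨ ((a ≤ x ∧ x < b) ∧ ¬(src ≤ x ∧ x < src + length))) := by
  unfold pvRuleStep
  by_cases hcut : max a src < min b (src + length)
  · simp only [if_pos hcut]
    refine ⟨?_, ?_, ?_, ?_⟩
    · rw [pvNE_append]
      refine ⟨h1, ?_⟩
      intro p hp; simp at hp; subst hp; simp; omega
    · rw [pvNE_append, pvNE_append]
      refine ⟨⟨h2, ?_⟩, ?_⟩ <;>
      · split_ifs with h
        · intro p hp; simp at hp; subst hp; simp; omega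
        · intro p hp; simp at hp
    · intro x
      rw [pvCov_append]
      apply or_congr_right
      simp only [pvCov_cons, pvCov_nil, or_false]
      constructor
      · rintro ⟨hx1, hx2⟩
        exact ⟨x - (dst - src), ⟨by simp at hx1 hx2 ⊢; omega, by simp at hx1 hx2 ⊢; omega⟩,
               ⟨by simp at hx1 hx2 ⊢; omega, by simp at hx1 hx2 ⊢; omega⟩, by omega⟩
      · rintro ⟨y, ⟨hy1, hy2⟩, ⟨hy3, hy4⟩, hxy⟩
        simp; omega
    · intro x
      rw [pvCov_append, pvCov_append, or_assoc]
      apply or_congr_right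
      constructor
      · rintro (h | h)
        · split_ifs at h with hc
          · simp only [pvCov_cons, pvCov_nil, or_false] at h; simp at h hc ⊢; omega
          · rw [pvCov_nil] at h; exact absurd h id
        · split_ifs at h with hc
          · simp only [pvCov_cons, pvCov_nil, or_false] at h; simp at h hc ⊢; omega
          · rw [pvCov_nil] at h; exact absurd h id
      · rintro ⟨⟨hx1, hx2⟩, hx3⟩
        by_cases hlt : x < max a src
        · left
          rw [if_pos (by omega), pvCov_cons]
          simp at hlt ⊢; omega
        · right
          rw [if_pos (by simp at hlt ⊢; omega), pvCov_cons]
          simp at hlt ⊢; omega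
  · simp only [if_neg hcut]
    refine ⟨h1, ?_, fun x => ?_, fun x => ?_⟩
    · rw [pvNE_append]
      refine ⟨h2, ?_⟩
      intro p hp; simp at hp; subst hp; exact hab
    · constructor
      · exact Or.inl
      · rintro (h | ⟨y, ⟨hy1, hy2⟩, ⟨hy3, hy4⟩, _⟩)
        · exact h
        · exact absurd hcut (by simp; omega)
    · rw [pvCov_append]
      apply or_congr_right
      simp only [pvCov_cons, pvCov_nil, or_false]
      constructor
      · rintro ⟨hx1, hx2⟩
        refine ⟨⟨hx1, hx2⟩, ?_⟩
        intro ⟨h3, h4⟩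
        exact hcut (by simp; omega)
      · rintro ⟨⟨hx1, hx2⟩, _⟩; exact ⟨hx1, hx2⟩

-- folding one rule over the whole pending list
theorem ruleFold_spec (dst src length : Int) (pend : List (Int × Int)) :
    ∀ st : List (Int × Int) × List (Int × Int), pvNE st.1 → pvNE st.2 → pvNE pend →
      pvNE (pend.foldl (pvRuleStep dst src length) st).1 ∧
      pvNE (pend.foldl (pvRuleStep dst src length) st).2 ∧
      (∀ x, pvCov (pend.foldl (pvRuleStep dst src length) st).1 x ↔
          pvCov st.1 x ∨ ∃ y, pvCov pend y ∧ (src ≤ y ∧ y < src + length) ∧ x = y + (dst - src)) ∧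
      (∀ x, pvCov (pend.foldl (pvRuleStep dst src length) st).2 x ↔
          pvCov st.2 x ∨ (pvCov pend x ∧ ¬(src ≤ x ∧ x < src + length))) := by
  induction pend with
  | nil =>
    intro st h1 h2 _
    refine ⟨h1, h2, fun x => ?_, fun x => ?_⟩ <;> simp [pvCov_nil]
  | cons ab t ih =>
    intro st h1 h2 hpend
    obtain ⟨a, b⟩ := ab
    have hab : a < b := hpend (a, b) (by simp)
    have hpt : pvNE t := fun p hp => hpend p (List.mem_cons_of_mem _ hp)
    obtain ⟨s1, s2, s3, s4⟩ := ruleStep_spec dst src length a b st hab h1 h2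
    simp only [List.foldl_cons]
    obtain ⟨i1, i2, i3, i4⟩ := ih (pvRuleStep dst src length st (a, b)) s1 s2 hpt
    refine ⟨i1, i2, fun x => ?_, fun x => ?_⟩
    · rw [i3, s3]
      constructor
      · rintro ((h | ⟨y, hy, hr, hx⟩) | ⟨y, hy, hr, hx⟩)
        · exact Or.inl h
        · exact Or.inr ⟨y, by rw [pvCov_cons]; exact Or.inl hy, hr, hx⟩
        · exact Or.inr ⟨y, by rw [pvCov_cons]; exact Or.inr hy, hr, hx⟩
      · rintro (h | ⟨y, hy, hr, hx⟩)
        · exact Or.inl (Or.inl h)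
        · rw [pvCov_cons] at hy
          rcases hy with hy | hy
          · exact Or.inl (Or.inr ⟨y, hy, hr, hx⟩)
          · exact Or.inr ⟨y, hy, hr, hx⟩
    · rw [i4, s4, pvCov_cons]
      tauto

theorem apply_of_not_hits (x : Int) (rules : List (Int × Int × Int)) (h : ¬ pvHits x rules) :
    pvA_applyRules x rules = x := by
  induction rules with
  | nil => rfl
  | cons q t ih =>
    obtain ⟨d, s, l⟩ := q
    rw [pvHits_cons] at h
    simp only [pvA_applyRules]
    rw [if_neg (fun hm => h (Or.inl hm))]
    exact ih (fun hm => h (Or.inr hm))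

-- the rules loop over one piece's pending list: out collects images of hit
-- values, pend keeps the values no rule hits
theorem pieceFold_spec (rules : List (Int × Int × Int)) :
    ∀ out pend : List (Int × Int), pvNE out → pvNE pend →
      pvNE (pvPieceFold rules out pend).1 ∧
      pvNE (pvPieceFold rules out pend).2 ∧
      (∀ x, pvCov (pvPieceFold rules out pend).1 x ↔
          pvCov out x ∨ ∃ y, pvCov pend y ∧ pvHits y rules ∧ x = pvA_applyRules y rules) ∧
      (∀ x, pvCov (pvPieceFold rules out pend).2 x ↔ pvCov pend x ∧ ¬ pvHits x rules) := by
  induction rules with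
  | nil =>
    intro out pend h1 h2
    refine ⟨h1, h2, fun x => ?_, fun x => ?_⟩
    · simp [pvPieceFold, pvHits]
    · simp [pvPieceFold, pvHits]
  | cons q t ih =>
    intro out pend h1 h2
    obtain ⟨d, s, l⟩ := q
    simp only [pvPieceFold, List.foldl_cons]
    obtain ⟨r1, r2, r3, r4⟩ :=
      ruleFold_spec d s l pend (out, []) h1 (by intro p hp; simp at hp) h2
    set st1 := pend.foldl (pvRuleStep d s l) (out, []) with hst1
    obtain ⟨i1, i2, i3, i4⟩ := ih st1.1 st1.2 r1 r2
    simp only [pvPieceFold] at i1 i2 i3 i4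
    refine ⟨i1, i2, fun x => ?_, fun x => ?_⟩
    · rw [i3]
      constructor
      · rintro (h | ⟨y, hy, hh, hx⟩)
        · rw [r3] at h
          rcases h with h | ⟨y, hy, hm, hx⟩
          · exact Or.inl h
          · refine Or.inr ⟨y, hy, by rw [pvHits_cons]; exact Or.inl hm, ?_⟩
            simp only [pvA_applyRules, if_pos hm]
            omega
        · rw [r4] at hy
          rcases hy with hy | ⟨hy, hnm⟩
          · rw [pvCov_nil] at hy; exact absurd hy id
          · refine Or.inr ⟨y, hy, by rw [pvHits_cons]; exact Or.inr hh, ?_⟩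
            rw [hx]; simp only [pvA_applyRules, if_neg hnm]
      · rintro (h | ⟨y, hy, hh, hx⟩)
        · exact Or.inl (by rw [r3]; exact Or.inl h)
        · rw [pvHits_cons] at hh
          by_cases hm : s ≤ y ∧ y < s + l
          · refine Or.inl ?_
            rw [r3]
            refine Or.inr ⟨y, hy, hm, ?_⟩
            rw [hx]; simp only [pvA_applyRules, if_pos hm]
          · refine Or.inr ⟨y, ?_, ?_, ?_⟩
            · rw [r4]; exact Or.inr ⟨hy, hm⟩
            · tauto
            · rw [hx]; simp only [pvA_applyRules, if_neg hm]
    · rw [i4, r4, pvCov_nil, pvHits_cons]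
      tauto

-- one whole layer: the new interval list covers exactly the layer-image
theorem layer_foldl_spec (rules : List (Int × Int × Int)) (ivs : List (Int × Int)) :
    ∀ out0 : List (Int × Int), pvNE out0 → pvNE ivs →
      pvNE (ivs.foldl (fun out iv => (pvPieceFold rules out [iv]).1 ++ (pvPieceFold rules out [iv]).2) out0) ∧
      (∀ x, pvCov (ivs.foldl (fun out iv => (pvPieceFold rules out [iv]).1 ++ (pvPieceFold rules out [iv]).2) out0) x ↔
          pvCov out0 x ∨ ∃ y, pvCov ivs y ∧ x = pvA_applyRules y rules) := by
  induction ivs with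
  | nil =>
    intro out0 h0 _
    refine ⟨h0, fun x => ?_⟩
    simp [pvCov_nil]
  | cons iv t ih =>
    intro out0 h0 hne
    have hiv : pvNE [iv] := by
      intro p hp
      have hpiv : p = iv := by simpa using hp
      rw [hpiv]; exact hne iv (by simp)
    obtain ⟨p1, p2, p3, p4⟩ := pieceFold_spec rules out0 [iv] h0 hiv
    have hne1 : pvNE ((pvPieceFold rules out0 [iv]).1 ++ (pvPieceFold rules out0 [iv]).2) := by
      rw [pvNE_append]; exact ⟨p1, p2⟩
    have hnt : pvNE t := fun p hp => hne p (List.mem_cons_of_mem _ hp)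
    obtain ⟨i1, i2⟩ := ih _ hne1 hnt
    simp only [List.foldl_cons]
    refine ⟨i1, fun x => ?_⟩
    rw [i2]
    have hout1 : ∀ x, pvCov ((pvPieceFold rules out0 [iv]).1 ++ (pvPieceFold rules out0 [iv]).2) x ↔
        pvCov out0 x ∨ ∃ y, pvCov [iv] y ∧ x = pvA_applyRules y rules := by
      intro x
      rw [pvCov_append, p3 x, p4 x]
      constructor
      · rintro ((h | ⟨y, hy, hh, hx⟩) | ⟨hy, hnh⟩)
        · exact Or.inl h
        · exact Or.inr ⟨y, hy, hx⟩
        · exact Or.inr ⟨x, hy, (apply_of_not_hits x rules hnh).symm⟩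
      · rintro (h | ⟨y, hy, hx⟩)
        · exact Or.inl (Or.inl h)
        · by_cases hh : pvHits y rules
          · exact Or.inl (Or.inr ⟨y, hy, hh, hx⟩)
          · rw [apply_of_not_hits y rules hh] at hx; subst hx
            exact Or.inr ⟨hy, hh⟩
    rw [hout1]
    constructor
    · rintro ((h | ⟨y, hy, hx⟩) | ⟨y, hy, hx⟩)
      · exact Or.inl h
      · refine Or.inr ⟨y, ?_, hx⟩
        rw [pvCov_cons]
        rw [pvCov_cons, pvCov_nil, or_false] at hy
        exact Or.inl hy
      · exact Or.inr ⟨y, by rw [pvCov_cons]; exact Or.inr hy, hx⟩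
    · rintro (h | ⟨y, hy, hx⟩)
      · exact Or.inl (Or.inl h)
      · rw [pvCov_cons] at hy
        rcases hy with hy | hy
        · exact Or.inl (Or.inr ⟨y, by rw [pvCov_cons, pvCov_nil, or_false]; exact hy, hx⟩)
        · exact Or.inr ⟨y, hy, hx⟩

theorem layer_spec (rules : List (Int × Int × Int)) (ivs : List (Int × Int)) (hne : pvNE ivs) :
    pvNE (pvLayer rules ivs) ∧
    (∀ x, pvCov (pvLayer rules ivs) x ↔ ∃ y, pvCov ivs y ∧ x = pvA_applyRules y rules) := by
  obtain ⟨h1, h2⟩ := layer_foldl_spec rules ivs [] (by intro p hp; simp at hp) hne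
  refine ⟨h1, fun x => ?_⟩
  rw [pvLayer, h2, pvCov_nil, false_or]

theorem pvCov_congr_mem (xs ys : List (Int × Int)) (h : ∀ p, p ∈ xs ↔ p ∈ ys) (x : Int) :
    pvCov xs x ↔ pvCov ys x := by
  simp only [pvCov]
  constructor
  · rintro ⟨p, hp, hx⟩; exact ⟨p, (h p).1 hp, hx⟩
  · rintro ⟨p, hp, hx⟩; exact ⟨p, (h p).2 hp, hx⟩

-- the merge sweep over a lo-sorted interval list covers exactly what the list covers
theorem mergeStep_foldl_spec (vs : List (Int × Int)) :
    ∀ acc : List (Int × Int),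
      vs.Pairwise (fun p q => p.1 ≤ q.1) → pvNE vs → pvNE acc →
      (∀ p ∈ acc.head?, ∀ q ∈ vs, p.1 ≤ q.1) →
      pvNE (vs.foldl pvMergeStep acc) ∧
      (∀ x, pvCov (vs.foldl pvMergeStep acc) x ↔ pvCov acc x ∨ pvCov vs x) := by
  induction vs with
  | nil =>
    intro acc _ _ hacc _
    refine ⟨hacc, fun x => ?_⟩
    simp [pvCov_nil]
  | cons iv t ih =>
    intro acc hpw hne hacc hhd
    obtain ⟨lo, hi⟩ := iv
    have hlohi : lo < hi := hne (lo, hi) (by simp)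
    have hpw' : t.Pairwise (fun p q => p.1 ≤ q.1) := (List.pairwise_cons.1 hpw).2
    have hlot : ∀ q ∈ t, lo ≤ q.1 := (List.pairwise_cons.1 hpw).1
    have hnet : pvNE t := fun p hp => hne p (List.mem_cons_of_mem _ hp)
    simp only [List.foldl_cons]
    have hstep : pvNE (pvMergeStep acc (lo, hi)) ∧
        (∀ x, pvCov (pvMergeStep acc (lo, hi)) x ↔ pvCov acc x ∨ (lo ≤ x ∧ x < hi)) ∧
        (∀ p ∈ (pvMergeStep acc (lo, hi)).head?, ∀ q ∈ t, p.1 ≤ q.1) := by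
      cases acc with
      | nil =>
        refine ⟨?_, fun x => ?_, ?_⟩
        · intro p hp
          have : p = (lo, hi) := by simpa [pvMergeStep] using hp
          rw [this]; exact hlohi
        · simp [pvMergeStep, pvCov_cons, pvCov_nil]
        · intro p hp q hq
          have : p = (lo, hi) := by
            simp only [pvMergeStep, List.head?_cons, Option.mem_def, Option.some.injEq] at hp
            exact hp.symm
          rw [this]; exact hlot q hq
      | cons hd t' =>
        obtain ⟨a, b⟩ := hd
        have hab : a < b := hacc (a, b) (by simp)
        have halo : a ≤ lo := hhd (a, b) (by simp) (lo, hi) (by simp)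
        have hmrg : pvMergeStep ((a, b) :: t') (lo, hi)
            = if lo ≤ b then (a, max b hi) :: t' else (lo, hi) :: (a, b) :: t' := rfl
        by_cases hc : lo ≤ b
        · rw [hmrg, if_pos hc]
          refine ⟨?_, fun x => ?_, ?_⟩
          · intro p hp
            rcases List.mem_cons.1 hp with rfl | hp'
            · exact lt_of_lt_of_le hab (by simp)
            · exact hacc p (List.mem_cons_of_mem _ hp')
          · rw [pvCov_cons, pvCov_cons]
            constructor
            · rintro (h | h)
              · simp only at h
                by_cases hx : x < b
                · exact Or.inl (Or.inl ⟨h.1, hx⟩)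
                · have hxhi : x < hi := by
                    rcases le_total hi b with hh | hh
                    · rw [max_eq_left hh] at h; omega
                    · rw [max_eq_right hh] at h; omega
                  exact Or.inr ⟨by omega, hxhi⟩
              · exact Or.inl (Or.inr h)
            · rintro ((h | h) | h)
              · exact Or.inl ⟨h.1, lt_of_lt_of_le h.2 (le_max_left _ _)⟩
              · exact Or.inr h
              · exact Or.inl ⟨le_trans halo h.1, lt_of_lt_of_le h.2 (le_max_right _ _)⟩
          · intro p hp q hq
            have : p = (a, max b hi) := by
              simp only [List.head?_cons, Option.mem_def, Option.some.injEq] at hp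
              exact hp.symm
            rw [this]; exact le_trans halo (hlot q hq)
        · rw [hmrg, if_neg hc]
          refine ⟨?_, fun x => ?_, ?_⟩
          · intro p hp
            rcases List.mem_cons.1 hp with rfl | hp'
            · exact hlohi
            · exact hacc p hp'
          · rw [pvCov_cons, pvCov_cons]
            tauto
          · intro p hp q hq
            have : p = (lo, hi) := by
              simp only [List.head?_cons, Option.mem_def, Option.some.injEq] at hp
              exact hp.symm
            rw [this]; exact hlot q hq
    obtain ⟨s1, s2, s3⟩ := hstep
    obtain ⟨i1, i2⟩ := ih (pvMergeStep acc (lo, hi)) hpw' hnet s1 s3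
    refine ⟨i1, fun x => ?_⟩
    rw [i2, s2 x, pvCov_cons]
    tauto

theorem normalize_spec (out : List (Int × Int)) (hne : pvNE out) :
    pvNE (pvNormalize out) ∧ (∀ x, pvCov (pvNormalize out) x ↔ pvCov out x) := by
  have hmem : ∀ p, p ∈ PySem.List.sorted out (fun iv => iv.1) false ↔ p ∈ out :=
    fun p => PySem.List.mem_sorted out (fun iv => iv.1) false p
  have hnes : pvNE (PySem.List.sorted out (fun iv => iv.1) false) :=
    fun p hp => hne p ((hmem p).1 hp)
  have hpw : (PySem.List.sorted out (fun iv => iv.1) false).Pairwise (fun p q => p.1 ≤ q.1) :=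
    PySem.List.sorted_pairwise out (fun iv => iv.1)
  obtain ⟨m1, m2⟩ := mergeStep_foldl_spec (PySem.List.sorted out (fun iv => iv.1) false) []
    hpw hnes (by intro p hp; simp at hp) (by intro p hp; simp at hp)
  constructor
  · intro p hp
    rw [pvNormalize, List.mem_reverse] at hp
    exact m1 p hp
  · intro x
    rw [pvNormalize, pvCov_reverse, m2 x, pvCov_nil, false_or]
    exact pvCov_congr_mem _ _ hmem x

-- all layers: the final interval list covers exactly the image of the composed map
theorem layers_spec (mapDict : List (String × List (Int × Int × Int))) :
    ∀ ivs : List (Int × Int), pvNE ivs →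
      pvNE (mapDict.foldl (fun ivs kv => pvNormalize (pvLayer kv.2 ivs)) ivs) ∧
      (∀ x, pvCov (mapDict.foldl (fun ivs kv => pvNormalize (pvLayer kv.2 ivs)) ivs) x ↔
          ∃ y, pvCov ivs y ∧ x = mapDict.foldl (fun c kv => pvA_applyRules c kv.2) y) := by
  induction mapDict with
  | nil =>
    intro ivs hne
    refine ⟨hne, fun x => ?_⟩
    simp only [List.foldl_nil]
    constructor
    · intro h; exact ⟨x, h, rfl⟩
    · rintro ⟨y, hy, rfl⟩; exact hy
  | cons kv t ih =>
    intro ivs hne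
    obtain ⟨l1, l2⟩ := layer_spec kv.2 ivs hne
    obtain ⟨n1, n2⟩ := normalize_spec (pvLayer kv.2 ivs) l1
    obtain ⟨i1, i2⟩ := ih (pvNormalize (pvLayer kv.2 ivs)) n1
    simp only [List.foldl_cons]
    refine ⟨i1, fun x => ?_⟩
    rw [i2]
    constructor
    · rintro ⟨y', hy', hx⟩
      rw [n2, l2] at hy'
      obtain ⟨y, hy, rfl⟩ := hy'
      exact ⟨y, hy, hx⟩
    · rintro ⟨y, hy, hx⟩
      exact ⟨pvA_applyRules y kv.2, by rw [n2, l2]; exact ⟨y, hy, rfl⟩, hx⟩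

-- running-minimum facts
theorem foldl_min_le_init (xs : List Int) (m : Int) : xs.foldl min m ≤ m := by
  induction xs generalizing m with
  | nil => exact le_refl m
  | cons h t ih => exact le_trans (ih (min m h)) (min_le_left m h)

theorem foldl_min_le_mem (xs : List Int) : ∀ m x : Int, x ∈ xs → xs.foldl min m ≤ x := by
  induction xs with
  | nil => intro m x hx; simp at hx
  | cons h t ih =>
    intro m x hx
    rcases List.mem_cons.1 hx with rfl | hx'
    · exact le_trans (foldl_min_le_init t (min m x)) (min_le_right m x)
    · exact ih (min m h) x hx'

theorem foldl_min_mem_or (xs : List Int) (m : Int) :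
    xs.foldl min m = m ∨ xs.foldl min m ∈ xs := by
  induction xs generalizing m with
  | nil => exact Or.inl rfl
  | cons h t ih =>
    simp only [List.foldl_cons]
    rcases ih (min m h) with heq | hmem
    · rcases min_choice m h with hc | hc
      · exact Or.inl (heq.trans hc)
      · exact Or.inr (by rw [heq, hc]; exact List.mem_cons_self ..)
    · exact Or.inr (List.mem_cons_of_mem _ hmem)

-- A's running-min loop over f-images = fold of min over the mapped list
theorem foldl_min_map (f : Int → Int) (xs : List Int) (m : Int) :
    xs.foldl (fun minimum seed => if f seed < minimum then f seed else minimum) m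
      = (xs.map f).foldl min m := by
  induction xs generalizing m with
  | nil => rfl
  | cons h t ih =>
    simp only [List.foldl_cons, List.map_cons, ih]
    congr 1
    omega

theorem calcSingleRangeMinimum_eq (r : List Int) (mapDict : List (String × List (Int × Int × Int))) :
    calcSingleRangeMinimum r mapDict = calcSingleRangeMinimum_alt r mapDict := by
  -- names
  set F : Int → Int := fun sd => mapDict.foldl (fun c kv => pvA_applyRules c kv.2) sd with hF
  set M : Int := 9999999999999 with hM
  -- the initial interval list covers exactly the elements of r
  obtain ⟨rne, rcov⟩ :=
    runStep_foldl_spec (PySem.List.sorted (PySem.Set.ofList r) (fun x => x) false) [] (by intro p hp; simp at hp)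
  set ivs0 := ((PySem.List.sorted (PySem.Set.ofList r) (fun x => x) false).foldl pvRunStep []).reverse with hivs0
  have hne0 : pvNE ivs0 := by
    intro p hp
    rw [hivs0, List.mem_reverse] at hp
    exact rne p hp
  have hcov0 : ∀ x, pvCov ivs0 x ↔ x ∈ r := by
    intro x
    rw [hivs0, pvCov_reverse, rcov x, pvCov_nil, false_or,
        PySem.List.mem_sorted, PySem.Set.mem_ofList]
  -- the final interval list covers exactly the F-image of r
  obtain ⟨hneF, hcovF⟩ := layers_spec mapDict ivs0 hne0
  set ivs := mapDict.foldl (fun ivs kv => pvNormalize (pvLayer kv.2 ivs)) ivs0 with hivs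
  have hcov : ∀ x, pvCov ivs x ↔ ∃ y, y ∈ r ∧ x = F y := by
    intro x
    rw [hivs, hcovF x]
    constructor
    · rintro ⟨y, hy, hx⟩; exact ⟨y, (hcov0 y).1 hy, hx⟩
    · rintro ⟨y, hy, hx⟩; exact ⟨y, (hcov0 y).2 hy, hx⟩
  -- both sides as min-folds
  have hA : calcSingleRangeMinimum r mapDict = (r.map F).foldl min M := by
    rw [calcSingleRangeMinimum]
    exact foldl_min_map F r M
  have hB : calcSingleRangeMinimum_alt r mapDict = (ivs.map Prod.fst).foldl min M := by
    rw [calcSingleRangeMinimum_alt]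
    simp only [PySem.List.min?_id_cons, Option.getD_some]
    rfl
  rw [hA, hB]
  apply le_antisymm
  · -- A-min ≤ B-min
    rcases foldl_min_mem_or (ivs.map Prod.fst) M with heq | hmem
    · rw [heq]; exact foldl_min_le_init _ _
    · obtain ⟨p, hp, hfst⟩ := List.mem_map.1 hmem
      have hcv : pvCov ivs ((ivs.map Prod.fst).foldl min M) := by
        refine ⟨p, hp, ?_, ?_⟩
        · exact le_of_eq hfst
        · rw [← hfst]; exact hneF p hp
      obtain ⟨y, hy, hx⟩ := (hcov _).1 hcv
      rw [hx]
      exact foldl_min_le_mem _ _ _ (List.mem_map.2 ⟨y, hy, rfl⟩)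
  · -- B-min ≤ A-min
    rcases foldl_min_mem_or (r.map F) M with heq | hmem
    · rw [heq]; exact foldl_min_le_init _ _
    · obtain ⟨y, hy, hfy⟩ := List.mem_map.1 hmem
      have hcv : pvCov ivs ((r.map F).foldl min M) := by
        rw [hcov]; exact ⟨y, hy, hfy.symm⟩
      obtain ⟨p, hp, hle, _⟩ := hcv
      exact le_trans (foldl_min_le_mem _ _ _ (List.mem_map.2 ⟨p, hp, rfl⟩)) hle

-- ===== VERDICT (by name: the statement is the Claim_ definition above) =====
theorem calcSingleRangeMinimum_spec : Claim_equal_calcSingleRangeMinimum := by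
  intro r mapDict _
  exact calcSingleRangeMinimum_eq r mapDict
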